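-- pv_equiv track=rewrite | github.com/DavOstx7/random-code | python/newExercises/GoogleInterviews/ex1-MatrixIsland/pysol2.py | GetToEdge
-- ===== SOURCE A (Python) =====
-- def GetToEdge(save1, rc, edgesR, edgesC, visited):
--     r = rc[0]
--     c = rc[1]
--
--     if(r in edgesR or c in edgesC):
--         return True
--
--     if(rc in visited):
--         return False
--
--     visited.append(rc)
--     options = [(r+1,c), (r-1,c), (r,c+1), (r,c-1)]
--
--     for t in options:
--         if(t in save1):
--             if(GetToEdge(save1, t, edgesR, edgesC, visited)):
--                 return True
--
--     return False
-- ===== SOURCE B (Python) =====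
-- def GetToEdge(save1, rc, edgesR, edgesC, visited):
--     # Iterative DFS with an explicit stack instead of recursion; same return
--     # value and the same in-place appends to visited, in the same order.
--     stack = [rc]
--     while stack:
--         (r, c) = stack.pop()
--         if r in edgesR or c in edgesC:
--             return True
--         if (r, c) in visited:
--             continue
--         visited.append((r, c))
--         stack += [t for t in ((r, c - 1), (r, c + 1), (r - 1, c), (r + 1, c)) if t in save1]
--     return False
-- ===== Notes on version B (the rewrite author's own statement) =====
-- stated objective: alternative
-- what changed: The recursive DFS is replaced by an iterative DFS with an explicit stack (mark-on-pop, neighbors pushed in reverse so pop order matches the recursion's pre-order), avoiding Python recursion depth limits; same return value and the same in-place appends to visited.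
import Mathlib
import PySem

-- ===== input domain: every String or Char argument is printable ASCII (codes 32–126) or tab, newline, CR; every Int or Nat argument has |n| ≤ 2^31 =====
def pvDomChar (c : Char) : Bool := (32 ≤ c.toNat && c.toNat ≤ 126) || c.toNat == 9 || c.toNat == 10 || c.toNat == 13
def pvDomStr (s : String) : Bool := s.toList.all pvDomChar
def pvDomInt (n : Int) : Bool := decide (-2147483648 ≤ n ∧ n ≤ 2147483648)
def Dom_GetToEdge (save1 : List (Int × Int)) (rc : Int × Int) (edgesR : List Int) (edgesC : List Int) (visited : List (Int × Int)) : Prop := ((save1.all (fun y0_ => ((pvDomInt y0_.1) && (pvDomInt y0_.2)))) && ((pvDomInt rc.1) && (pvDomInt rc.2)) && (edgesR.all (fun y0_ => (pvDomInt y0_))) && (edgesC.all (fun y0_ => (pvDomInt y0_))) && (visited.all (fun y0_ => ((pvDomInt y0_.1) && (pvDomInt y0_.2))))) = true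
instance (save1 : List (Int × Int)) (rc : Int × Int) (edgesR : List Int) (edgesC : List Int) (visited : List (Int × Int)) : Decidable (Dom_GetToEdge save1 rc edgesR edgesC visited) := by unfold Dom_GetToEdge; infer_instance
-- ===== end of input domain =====

-- B replaces the recursive DFS by an iterative explicit-stack DFS (same return value;
-- both versions mutate `visited` in Python and B performs the identical appends, so only
-- the return value is what the theorems below are about).

-- ===== PORT A =====
-- A's recursion threads the mutated `visited` through the calls, so the helper returns
-- (result, visited).  The recursion is made total with a fuel argument: 2*|save1|+2 is a
-- bound on A's recursion depth (each level below the first adds a new save1 cell to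
-- visited), so the fuel-0 branch is never the one that produces the result.
def goA (save1 : List (Int × Int)) (edgesR : List Int) (edgesC : List Int) :
    Nat → (Int × Int) → List (Int × Int) → Bool × List (Int × Int)
  | 0, _, visited => (false, visited)
  | fuel+1, rc, visited =>
    if rc.1 ∈ edgesR ∨ rc.2 ∈ edgesC then (true, visited)
    else if rc ∈ visited then (false, visited)
    else
      -- visited.append(rc); then the for-loop over options with early return,
      -- transliterated as a fold carrying the (returned?, visited) state
      [(rc.1+1, rc.2), (rc.1-1, rc.2), (rc.1, rc.2+1), (rc.1, rc.2-1)].foldl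
        (fun st t =>
          if st.1 then st
          else if t ∈ save1 then goA save1 edgesR edgesC fuel t st.2 else st)
        (false, visited ++ [rc])

def GetToEdge (save1 : List (Int × Int)) (rc : Int × Int) (edgesR : List Int) (edgesC : List Int) (visited : List (Int × Int)) : Bool :=
  (goA save1 edgesR edgesC (2 * save1.length + 2) rc visited).1

-- ===== PORT B =====
-- stack is top-first (Python's list end = our head); `stack += [t for t in (...) if t in save1]`
-- becomes prepending the reverse of the filtered quadruple.  Well-founded: each iteration
-- either shrinks the stack or moves a stack cell into visited while pushing ≤ 4 save1 cells.
def goB (save1 : List (Int × Int)) (edgesR : List Int) (edgesC : List Int) :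
    List (Int × Int) → List (Int × Int) → Bool × List (Int × Int)
  | [], visited => (false, visited)
  | x :: rest, visited =>
    if x.1 ∈ edgesR ∨ x.2 ∈ edgesC then (true, visited)
    else if x ∈ visited then goB save1 edgesR edgesC rest visited
    else goB save1 edgesR edgesC
        ((([(x.1, x.2-1), (x.1, x.2+1), (x.1-1, x.2), (x.1+1, x.2)].filter (· ∈ save1)).reverse) ++ rest)
        (visited ++ [x])
  termination_by stack visited => 5 * ((save1 ++ stack).toFinset \ visited.toFinset).card + stack.length
  decreasing_by
  · have hsub : ((save1 ++ rest).toFinset \ visited.toFinset) ⊆ ((save1 ++ x :: rest).toFinset \ visited.toFinset) := by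
      intro y hy
      simp only [Finset.mem_sdiff, List.mem_toFinset, List.mem_append, List.mem_cons] at hy ⊢
      tauto
    have := Finset.card_le_card hsub
    simp only [List.length_cons]
    omega
  · rename_i hedge hvis
    have hxmem : x ∈ ((save1 ++ x :: rest).toFinset \ visited.toFinset) := by
      simp only [Finset.mem_sdiff, List.mem_toFinset, List.mem_append, List.mem_cons]
      tauto
    have hsub : ((save1 ++ (([(x.1, x.2-1), (x.1, x.2+1), (x.1-1, x.2), (x.1+1, x.2)].filter (· ∈ save1)).reverse ++ rest)).toFinset \ (visited ++ [x]).toFinset)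
        ⊆ ((save1 ++ x :: rest).toFinset \ visited.toFinset).erase x := by
      intro y hy
      simp only [Finset.mem_sdiff, List.mem_toFinset, List.mem_append, List.mem_cons,
        List.mem_reverse, List.mem_filter, List.not_mem_nil,
        Finset.mem_erase, decide_eq_true_eq] at hy ⊢
      tauto
    have hcard := Finset.card_le_card hsub
    rw [Finset.card_erase_of_mem hxmem] at hcard
    have hlen : (([(x.1, x.2-1), (x.1, x.2+1), (x.1-1, x.2), (x.1+1, x.2)].filter (· ∈ save1)).reverse).length ≤ 4 := by
      rw [List.length_reverse]
      exact le_trans (List.length_filter_le _ _) (by simp)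
    have hpos : 0 < ((save1 ++ x :: rest).toFinset \ visited.toFinset).card := Finset.card_pos.mpr ⟨x, hxmem⟩
    simp only [List.length_append, List.length_cons]
    omega

def GetToEdge_alt (save1 : List (Int × Int)) (rc : Int × Int) (edgesR : List Int) (edgesC : List Int) (visited : List (Int × Int)) : Bool :=
  (goB save1 edgesR edgesC [rc] visited).1

-- ===== PRECONDITION & SPEC =====
def Spec_GetToEdge (save1 : List (Int × Int)) (rc : Int × Int) (edgesR : List Int) (edgesC : List Int) (visited : List (Int × Int)) (out : Bool) : Prop := out = GetToEdge_alt save1 rc edgesR edgesC visited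
instance (save1 : List (Int × Int)) (rc : Int × Int) (edgesR : List Int) (edgesC : List Int) (visited : List (Int × Int)) (out : Bool) : Decidable (Spec_GetToEdge save1 rc edgesR edgesC visited out) := by unfold Spec_GetToEdge; infer_instance

-- ===== CLAIM (what is proved, stated in full; the proofs are below) =====
def Claim_equal_GetToEdge : Prop := ∀ (save1 : List (Int × Int)) (rc : Int × Int) (edgesR : List Int) (edgesC : List Int) (visited : List (Int × Int)), Dom_GetToEdge save1 rc edgesR edgesC visited → Spec_GetToEdge save1 rc edgesR edgesC visited (GetToEdge save1 rc edgesR edgesC visited)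

-- ===== LEMMAS AND PROOFS =====

-- number of save1 cells not yet visited
def nfv (save1 visited : List (Int × Int)) : Nat := (save1.toFinset \ visited.toFinset).card

theorem nfv_mono {save1 v w : List (Int × Int)} (h : v <+: w) : nfv save1 w ≤ nfv save1 v := by
  apply Finset.card_le_card
  apply Finset.sdiff_subset_sdiff (Finset.Subset.refl _)
  intro y hy
  simp only [List.mem_toFinset] at hy ⊢
  exact h.subset hy

-- goA only ever appends to visited
theorem goA_visited_prefix (save1 : List (Int × Int)) (edgesR edgesC : List Int) :
    ∀ fuel rc visited, visited <+: (goA save1 edgesR edgesC fuel rc visited).2 := by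
  intro fuel
  induction fuel with
  | zero => intro rc visited; simp [goA]
  | succ f ih =>
    intro rc visited
    simp only [goA]
    split
    · simp
    split
    · simp
    · -- fold over the option list
      have key : ∀ (opts : List (Int × Int)) (b : Bool) (v : List (Int × Int)),
          v <+: (opts.foldl (fun st t => if st.1 then st else if t ∈ save1 then goA save1 edgesR edgesC f t st.2 else st) (b, v)).2 := by
        intro opts
        induction opts with
        | nil => intro b v; simp
        | cons t rest ihr =>
          intro b v
          simp only [List.foldl_cons]
          by_cases hb : b = true
          · subst hb; simpa using ihr true v
          · simp only [Bool.not_eq_true] at hb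
            subst hb
            simp only [Bool.false_eq_true, if_false]
            by_cases ht : t ∈ save1
            · simp only [ht, if_pos]
              have h1 := ih t v
              have h2 := ihr (goA save1 edgesR edgesC f t v).1 (goA save1 edgesR edgesC f t v).2
              exact h1.trans h2
            · simp only [ht, ite_false]
              exact ihr false v
      exact (List.prefix_append _ _).trans (key _ false _)

-- once the fold's flag is true it stays fixed
theorem foldl_true (save1 : List (Int × Int)) (edgesR edgesC : List Int) (f : Nat) :
    ∀ (opts : List (Int × Int)) (v : List (Int × Int)),
      opts.foldl (fun st t => if st.1 then st else if t ∈ save1 then goA save1 edgesR edgesC f t st.2 else st) (true, v) = (true, v) := by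
  intro opts
  induction opts with
  | nil => intro v; rfl
  | cons t rest ih => intro v; simpa using ih v

-- the joint simulation lemma: L1 (single cell on top of the stack) and L (an options
-- fold against the filtered options pushed on the stack), by induction on A's fuel
theorem simulation (save1 : List (Int × Int)) (edgesR edgesC : List Int) :
    ∀ fa : Nat,
      (∀ (rc : Int × Int) (visited stack : List (Int × Int)),
        fa ≥ 2 * nfv save1 visited + (if rc ∈ save1 then 1 else 2) →
        goB save1 edgesR edgesC (rc :: stack) visited =
          (let p := goA save1 edgesR edgesC fa rc visited
           if p.1 then (true, p.2) else goB save1 edgesR edgesC stack p.2)) ∧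
      (∀ (opts : List (Int × Int)) (visited stack : List (Int × Int)),
        fa ≥ 2 * nfv save1 visited + 1 →
        goB save1 edgesR edgesC ((opts.filter (· ∈ save1)) ++ stack) visited =
          (let p := opts.foldl (fun st t => if st.1 then st else if t ∈ save1 then goA save1 edgesR edgesC fa t st.2 else st) (false, visited)
           if p.1 then (true, p.2) else goB save1 edgesR edgesC stack p.2)) := by
  intro fa
  induction fa with
  | zero =>
    constructor
    · intro rc visited stack h; split at h <;> omega
    · intro opts visited stack h; omega
  | succ f ih =>
    have L1 : ∀ (rc : Int × Int) (visited stack : List (Int × Int)),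
        f + 1 ≥ 2 * nfv save1 visited + (if rc ∈ save1 then 1 else 2) →
        goB save1 edgesR edgesC (rc :: stack) visited =
          (let p := goA save1 edgesR edgesC (f+1) rc visited
           if p.1 then (true, p.2) else goB save1 edgesR edgesC stack p.2) := by
      intro rc visited stack hfa
      simp only [goA, goB]
      by_cases hedge : rc.1 ∈ edgesR ∨ rc.2 ∈ edgesC
      · simp [hedge]
      by_cases hvis : rc ∈ visited
      · simp [hedge, hvis]
      · simp only [hedge, hvis, if_false]
        -- both expand; identify the pushed cells with the filtered options
        have hpush : (([(rc.1, rc.2-1), (rc.1, rc.2+1), (rc.1-1, rc.2), (rc.1+1, rc.2)].filter (· ∈ save1)).reverse)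
            = [(rc.1+1, rc.2), (rc.1-1, rc.2), (rc.1, rc.2+1), (rc.1, rc.2-1)].filter (· ∈ save1) := by
          simp only [List.filter_cons, List.filter_nil]
          split_ifs <;> rfl
        rw [hpush]
        -- fuel condition for the inner fold at visited ++ [rc]
        have hsdiff : save1.toFinset \ (visited ++ [rc]).toFinset = (save1.toFinset \ visited.toFinset).erase rc := by
          have h1 : (visited ++ [rc]).toFinset = insert rc visited.toFinset := by
            ext y; simp
          rw [h1, Finset.sdiff_insert]
        have hnf : 2 * nfv save1 (visited ++ [rc]) + 1 ≤ f := by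
          by_cases hmem : rc ∈ save1
          · have hx : rc ∈ save1.toFinset \ visited.toFinset := by
              simp [List.mem_toFinset, hmem, hvis]
            have heq : nfv save1 (visited ++ [rc]) + 1 = nfv save1 visited := by
              unfold nfv
              rw [hsdiff, Finset.card_erase_of_mem hx]
              have := Finset.card_pos.mpr ⟨rc, hx⟩
              omega
            simp only [hmem, if_pos] at hfa
            omega
          · have heq : nfv save1 (visited ++ [rc]) = nfv save1 visited := by
              unfold nfv
              rw [hsdiff, Finset.erase_eq_of_notMem]
              simp [hmem]
            simp only [hmem, if_false] at hfa
            omega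
        exact ih.2 [(rc.1+1, rc.2), (rc.1-1, rc.2), (rc.1, rc.2+1), (rc.1, rc.2-1)] (visited ++ [rc]) stack (by omega)
    refine ⟨L1, ?_⟩
    intro opts
    induction opts with
    | nil =>
      intro visited stack h
      simp [goB]
    | cons t rest ihr =>
      intro visited stack h
      by_cases ht : t ∈ save1
      · have hfilter : ((t :: rest).filter (· ∈ save1)) ++ stack = t :: ((rest.filter (· ∈ save1)) ++ stack) := by
          simp [List.filter_cons, ht]
        rw [hfilter, L1 t visited ((rest.filter (· ∈ save1)) ++ stack) (by simp [ht]; omega)]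
        rw [List.foldl_cons]
        simp only [Bool.false_eq_true, ite_false, ht, ite_true]
        set p := goA save1 edgesR edgesC (f+1) t visited with hp
        by_cases hp1 : p.1 = true
        · have hpt : p = (true, p.2) := Prod.ext_iff.mpr ⟨hp1, rfl⟩
          rw [hpt, foldl_true]
          simp [hp1]
        · have hp0 : p.1 = false := Bool.not_eq_true _ ▸ (by simpa using hp1)
          have hpf : p = (false, p.2) := Prod.ext_iff.mpr ⟨hp0, rfl⟩
          have hmono : nfv save1 p.2 ≤ nfv save1 visited :=
            nfv_mono (hp ▸ goA_visited_prefix save1 edgesR edgesC (f+1) t visited)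
          conv_rhs => rw [hpf]
          simp only [hp0, Bool.false_eq_true, ite_false]
          rw [ihr p.2 stack (by omega)]
      · have hfilter : ((t :: rest).filter (· ∈ save1)) = rest.filter (· ∈ save1) := by
          simp [List.filter_cons, ht]
        rw [hfilter, ihr visited stack h]
        simp [ht]

-- ===== VERDICT (by name: the statement is the Claim_ definition above) =====
theorem GetToEdge_spec : Claim_equal_GetToEdge := by
  intro save1 rc edgesR edgesC visited _
  unfold Spec_GetToEdge GetToEdge GetToEdge_alt
  have hnf : nfv save1 visited ≤ save1.length :=
    le_trans (Finset.card_le_card (Finset.sdiff_subset)) (List.toFinset_card_le _)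
  have h := (simulation save1 edgesR edgesC (2 * save1.length + 2)).1 rc visited []
    (by split <;> omega)
  rw [h]
  set p := goA save1 edgesR edgesC (2 * save1.length + 2) rc visited
  by_cases hp : p.1 <;> simp [hp, goB]
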